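-- pv_equiv track=rewrite | github.com/tarunmanchanda/Classification-Text-Analytics--ML | authorship_BOW_TREE.py | readCtxtfile
-- ===== SOURCE A (Python) =====
-- def readCtxtfile(bookText, docs, labels):
--     x = 0
--     i = 0
--     n = 150
--     while x < 200:
--         temp = ""
--         words = bookText.split(" ")[i:n]
--         for word in words:
--             temp = word + " " + temp
--         docs.append(temp)
--         labels.append(2)
--         i += 150
--         n += 150
--         x += 1
--     return docs, labels
-- ===== SOURCE B (Python) =====
-- def readCtxtfile(bookText, docs, labels):
--     bins = [""] * 200
--     for idx, word in enumerate(bookText.split(" ")):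
--         b = idx // 150
--         if b < 200:
--             bins[b] = word + " " + bins[b]
--     docs.extend(bins)
--     labels.extend([2] * 200)
--     return docs, labels
-- ===== Notes on version B (the rewrite author's own statement) =====
-- stated objective: alternative
-- what changed: Instead of 200 iterations that each re-split the whole text and slice out a 150-word window, B splits once and makes a single distributing pass over the words, prepending each word into its bucket idx // 150.
import Mathlib
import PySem

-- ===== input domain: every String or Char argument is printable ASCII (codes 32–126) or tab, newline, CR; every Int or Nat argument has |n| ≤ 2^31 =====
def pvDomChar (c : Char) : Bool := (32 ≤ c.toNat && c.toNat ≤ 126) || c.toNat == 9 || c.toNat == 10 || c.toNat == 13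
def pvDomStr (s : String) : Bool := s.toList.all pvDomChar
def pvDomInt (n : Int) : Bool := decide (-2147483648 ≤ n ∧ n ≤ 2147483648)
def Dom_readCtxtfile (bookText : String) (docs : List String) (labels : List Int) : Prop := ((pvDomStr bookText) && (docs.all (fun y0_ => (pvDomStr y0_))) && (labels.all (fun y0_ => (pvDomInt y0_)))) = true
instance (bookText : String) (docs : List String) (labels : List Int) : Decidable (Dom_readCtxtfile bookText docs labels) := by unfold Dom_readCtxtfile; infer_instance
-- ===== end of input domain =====

-- B replaces A's 200 re-split-and-slice passes by one distributing scan over the word list,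
-- splitting bookText once instead of 200 times (objective: alternative decomposition).
-- Both A and B mutate docs/labels in place (append/extend); B performs the same mutation.

-- ===== PORT A =====
-- while x < 200: temp = ""; words = bookText.split(" ")[i:n]; for word in words: temp = word+" "+temp;
-- docs.append(temp); labels.append(2); i += 150; n += 150; x += 1
-- fuel = 200 - x counts the remaining iterations of the while loop.
def readCtxtfileLoop (bookText : String) (docs : List String) (labels : List Int) :
    Nat → Int → Int → List String × List Int
  | 0, _, _ => (docs, labels)
  | fuel + 1, i, n =>
      let words := PySem.List.slice ((PySem.Str.split? bookText " ").getD []) (some i) (some n)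
      let temp := words.foldl (fun temp word => word ++ " " ++ temp) ""
      readCtxtfileLoop bookText (docs ++ [temp]) (labels ++ [(2 : Int)]) fuel (i + 150) (n + 150)

def readCtxtfile (bookText : String) (docs : List String) (labels : List Int) : List String × List Int :=
  readCtxtfileLoop bookText docs labels 200 0 150

-- ===== PORT B =====
-- for idx, word in enumerate(bookText.split(" ")): b = idx // 150; if b < 200: bins[b] = word + " " + bins[b]
-- (enumerate is ported as a Nat counter: Python's idx is a nonnegative int and idx // 150 on
-- nonnegative ints is exactly Nat division, so this is exact.)
def readCtxtfileBins : List String → Nat → List String → List String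
  | bins, _, [] => bins
  | bins, idx, w :: ws =>
      let b := idx / 150
      readCtxtfileBins (if b < 200 then bins.set b (w ++ " " ++ bins.getD b "") else bins) (idx + 1) ws

def readCtxtfile_alt (bookText : String) (docs : List String) (labels : List Int) : List String × List Int :=
  let bins := readCtxtfileBins (List.replicate 200 "") 0 ((PySem.Str.split? bookText " ").getD [])
  (docs ++ bins, labels ++ PySem.List.pyRepeat [(2 : Int)] 200)

-- ===== PRECONDITION & SPEC =====
def Spec_readCtxtfile (bookText : String) (docs : List String) (labels : List Int) (out : List String × List Int) : Prop := out = readCtxtfile_alt bookText docs labels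
instance (bookText : String) (docs : List String) (labels : List Int) (out : List String × List Int) : Decidable (Spec_readCtxtfile bookText docs labels out) := by unfold Spec_readCtxtfile; infer_instance

-- ===== CLAIM (what is proved, stated in full; the proofs are below) =====
def Claim_equal_readCtxtfile : Prop := ∀ (bookText : String) (docs : List String) (labels : List Int), Dom_readCtxtfile bookText docs labels → Spec_readCtxtfile bookText docs labels (readCtxtfile bookText docs labels)

-- ===== LEMMAS AND PROOFS =====

-- the reversed-with-trailing-space rendering of one chunk
def pvChunkStr (ws : List String) (x : Nat) : String :=
  ((ws.drop (150 * x)).take 150).foldl (fun temp word => word ++ " " ++ temp) ""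

-- the words of ws whose global index (local position + k) lies in bucket b
def pvSeg : List String → Nat → Nat → List String
  | [], _, _ => []
  | w :: ws, k, b => (if k / 150 = b then [w] else []) ++ pvSeg ws (k + 1) b

theorem readCtxtfileLoop_eq (bookText : String) (docs : List String) (labels : List Int)
    (fuel x : Nat) :
    readCtxtfileLoop bookText docs labels fuel ((150 * x : Nat) : Int) ((150 * x + 150 : Nat) : Int)
      = (docs ++ (List.range fuel).map (fun j => pvChunkStr ((PySem.Str.split? bookText " ").getD []) (x + j)),
         labels ++ List.replicate fuel (2 : Int)) := by
  induction fuel generalizing x docs labels with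
  | zero => simp [readCtxtfileLoop]
  | succ fuel ih =>
      have h1 : ((150 * x : Nat) : Int) + 150 = ((150 * (x + 1) : Nat) : Int) := by push_cast; ring
      have h2 : ((150 * x + 150 : Nat) : Int) + 150 = ((150 * (x + 1) + 150 : Nat) : Int) := by push_cast; ring
      have h3 : ((150 * x + 150 : Nat) : Int) = ((150 * x : Nat) : Int) + ((150 : Nat) : Int) := by push_cast; ring
      rw [readCtxtfileLoop, h1, h2, ih, List.range_succ_eq_map]
      rw [h3, PySem.List.slice_natCast_add, Prod.mk.injEq]
      refine ⟨?_, ?_⟩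
      · rw [List.append_assoc, List.singleton_append, List.map_cons, List.map_map]
        have hmap : List.map ((fun j => pvChunkStr ((PySem.Str.split? bookText " ").getD []) (x + j)) ∘ Nat.succ) (List.range fuel)
            = List.map (fun j => pvChunkStr ((PySem.Str.split? bookText " ").getD []) (x + 1 + j)) (List.range fuel) := by
          refine List.map_congr_left fun j _ => ?_
          simp only [Function.comp_apply]
          rw [show x + (j + 1) = x + 1 + j from by omega]
        rw [hmap]
        congr 1
      · simp [List.replicate_succ]

theorem readCtxtfileBins_length (ws : List String) (idx : Nat) (bins : List String) :
    (readCtxtfileBins bins idx ws).length = bins.length := by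
  induction ws generalizing idx bins with
  | nil => rfl
  | cons w ws ih =>
      rw [readCtxtfileBins, ih]
      split <;> simp

theorem readCtxtfileBins_getD (ws : List String) (idx : Nat) (bins : List String) (b : Nat)
    (hb : b < 200) (hlen : bins.length = 200) :
    (readCtxtfileBins bins idx ws).getD b ""
      = (pvSeg ws idx b).foldl (fun temp word => word ++ " " ++ temp) (bins.getD b "") := by
  induction ws generalizing idx bins with
  | nil => simp [readCtxtfileBins, pvSeg]
  | cons w ws ih =>
      simp only [readCtxtfileBins, pvSeg]
      by_cases hB : idx / 150 = b
      · have hlt : idx / 150 < 200 := hB ▸ hb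
        rw [if_pos hlt, if_pos hB, ih (idx + 1) _ (by rw [List.length_set]; exact hlen),
            List.singleton_append, List.foldl_cons]
        congr 1
        rw [hB, List.getD_eq_getElem?_getD, List.getElem?_set_self (by omega),
            List.getD_eq_getElem?_getD, Option.getD_some]
      · rw [if_neg hB, List.nil_append]
        by_cases hlt : idx / 150 < 200
        · rw [if_pos hlt, ih (idx + 1) _ (by rw [List.length_set]; exact hlen)]
          congr 1
          rw [List.getD_eq_getElem?_getD, List.getElem?_set_ne (by omega),
              List.getD_eq_getElem?_getD]
        · rw [if_neg hlt]
          exact ih (idx + 1) bins hlen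

theorem pvSeg_eq (ws : List String) (k b : Nat) :
    pvSeg ws k b = (ws.drop (150 * b - k)).take (150 * (b + 1) - max k (150 * b)) := by
  induction ws generalizing k with
  | nil => simp [pvSeg]
  | cons w ws ih =>
      rw [pvSeg, ih (k + 1)]
      by_cases h : k / 150 = b
      · rw [if_pos h, List.singleton_append,
            show 150 * b - k = 0 from by omega,
            show 150 * b - (k + 1) = 0 from by omega,
            show 150 * (b + 1) - max k (150 * b) = (150 * (b + 1) - max (k + 1) (150 * b)) + 1 from by omega,
            List.drop_zero, List.drop_zero, List.take_succ_cons]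
      · rw [if_neg h, List.nil_append]
        rcases Nat.lt_or_ge k (150 * b) with hk | hk
        · rw [show 150 * b - k = (150 * b - (k + 1)) + 1 from by omega, List.drop_succ_cons,
              show max k (150 * b) = 150 * b from by omega,
              show max (k + 1) (150 * b) = 150 * b from by omega]
        · rw [show 150 * (b + 1) - max k (150 * b) = 0 from by omega,
              show 150 * (b + 1) - max (k + 1) (150 * b) = 0 from by omega,
              List.take_zero, List.take_zero]

theorem getD_replicate_empty (n i : Nat) : (List.replicate n ("" : String)).getD i "" = "" := by
  rw [List.getD_eq_getElem?_getD, List.getElem?_replicate]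
  split <;> rfl

theorem readCtxtfileBins_eq (ws : List String) :
    readCtxtfileBins (List.replicate 200 "") 0 ws
      = (List.range 200).map (fun b => pvChunkStr ws b) := by
  apply List.ext_getElem?
  intro b
  by_cases hb : b < 200
  · rw [List.getElem?_eq_getElem (by rw [readCtxtfileBins_length, List.length_replicate]; exact hb),
        List.getElem?_eq_getElem (by rw [List.length_map, List.length_range]; exact hb)]
    have h1 : (readCtxtfileBins (List.replicate 200 "") 0 ws).getD b ""
        = (readCtxtfileBins (List.replicate 200 "") 0 ws)[b]'(by rw [readCtxtfileBins_length, List.length_replicate]; exact hb) := by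
      rw [List.getD_eq_getElem?_getD, List.getElem?_eq_getElem]; rfl
    rw [← h1, readCtxtfileBins_getD ws 0 _ b hb List.length_replicate, pvSeg_eq,
        getD_replicate_empty, Nat.sub_zero,
        show 150 * (b + 1) - max 0 (150 * b) = 150 from by omega]
    simp only [List.getElem_map, List.getElem_range, pvChunkStr]
  · rw [List.getElem?_eq_none (by rw [readCtxtfileBins_length, List.length_replicate]; omega),
        List.getElem?_eq_none (by rw [List.length_map, List.length_range]; omega)]

-- ===== VERDICT (by name: the statement is the Claim_ definition above) =====
theorem readCtxtfile_spec : Claim_equal_readCtxtfile := by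
  intro bookText docs labels _
  unfold Spec_readCtxtfile readCtxtfile readCtxtfile_alt
  have h := readCtxtfileLoop_eq bookText docs labels 200 0
  norm_num at h
  rw [h]
  simp only [readCtxtfileBins_eq, PySem.List.pyRepeat_singleton]
  rfl
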